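-- pv_equiv track=rewrite | github.com/masmi9/BluJay | scanners/aods/plugins/insecure_data_storage/file_storage_analyzer.py | _contains_storage_code
-- ===== SOURCE A (Python) =====
-- def _contains_storage_code(content: str) -> bool:
--     """Check if source code contains file storage operations."""
--     storage_indicators = [
--         "FileOutputStream",
--         "FileInputStream",
--         "FileWriter",
--         "FileReader",
--         "File(",
--         "Files.write",
--         "Files.read",
--         "openFileOutput",
--         "openFileInput",
--         "getFilesDir",
--         "getCacheDir",
--         "getExternalStorageDirectory",
--         "getExternalFilesDir",
--         "getExternalCacheDir",
--         "Environment.getExternalStorageDirectory",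
--         "createTempFile",
--         "RandomAccessFile",
--     ]
--
--     content_lower = content.lower()
--     return any(indicator.lower() in content_lower for indicator in storage_indicators)
-- ===== SOURCE B (Python) =====
-- import re
--
-- _STORAGE_PATTERN = re.compile(
--     "|".join(
--         re.escape(indicator)
--         for indicator in [
--             "FileOutputStream",
--             "FileInputStream",
--             "FileWriter",
--             "FileReader",
--             "File(",
--             "Files.write",
--             "Files.read",
--             "openFileOutput",
--             "openFileInput",
--             "getFilesDir",
--             "getCacheDir",
--             "getExternalStorageDirectory",
--             "getExternalFilesDir",
--             "getExternalCacheDir",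
--             "Environment.getExternalStorageDirectory",
--             "createTempFile",
--             "RandomAccessFile",
--         ]
--     ),
--     re.IGNORECASE,
-- )
--
--
-- def _contains_storage_code(content: str) -> bool:
--     """Check if source code contains file storage operations."""
--     return _STORAGE_PATTERN.search(content) is not None
-- ===== Notes on version B (the rewrite author's own statement) =====
-- stated objective: idiomatic
-- what changed: Replaces 17 independent lowercase-and-substring-scan passes over the content with one case-insensitive regex alternation, compiled once from the escaped indicators and searched in a single pass.
import Mathlib
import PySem

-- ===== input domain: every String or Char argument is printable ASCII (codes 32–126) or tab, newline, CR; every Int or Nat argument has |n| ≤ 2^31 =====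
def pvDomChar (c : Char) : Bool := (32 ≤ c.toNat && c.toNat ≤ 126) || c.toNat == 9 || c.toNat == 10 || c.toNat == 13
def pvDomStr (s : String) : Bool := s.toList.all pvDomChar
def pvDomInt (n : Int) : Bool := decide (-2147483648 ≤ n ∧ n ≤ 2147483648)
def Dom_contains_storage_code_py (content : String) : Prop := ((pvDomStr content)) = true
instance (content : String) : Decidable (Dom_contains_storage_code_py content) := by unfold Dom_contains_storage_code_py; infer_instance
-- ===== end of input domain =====

-- B compiles the 17 indicators once into a single case-insensitive regex alternation and
-- searches the content in one pass, instead of A's 17 separate lowercase substring scans.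


-- ===== PORT A =====
-- the storage_indicators list, verbatim
def storageIndicators : List String :=
  ["FileOutputStream", "FileInputStream", "FileWriter", "FileReader", "File(",
   "Files.write", "Files.read", "openFileOutput", "openFileInput", "getFilesDir",
   "getCacheDir", "getExternalStorageDirectory", "getExternalFilesDir",
   "getExternalCacheDir", "Environment.getExternalStorageDirectory",
   "createTempFile", "RandomAccessFile"]

def contains_storage_code_py (content : String) : Bool :=
  let contentLower := PySem.Chars.lower content.toList
  storageIndicators.any (fun indicator =>
    PySem.Chars.isIn (PySem.Chars.lower indicator.toList) contentLower)

-- ===== PORT B =====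
-- Model of Source B's compiled pattern: re.escape only quotes the metacharacters, so each
-- alternative of the alternation matches exactly the literal indicator; re.IGNORECASE on
-- these ASCII literals is exact as "lowercase the alternative and the subject".
def storagePatternAlts : List (List Char) :=
  (["FileOutputStream", "FileInputStream", "FileWriter", "FileReader", "File(",
    "Files.write", "Files.read", "openFileOutput", "openFileInput", "getFilesDir",
    "getCacheDir", "getExternalStorageDirectory", "getExternalFilesDir",
    "getExternalCacheDir", "Environment.getExternalStorageDirectory",
    "createTempFile", "RandomAccessFile"] : List String).map
    (fun ind => PySem.Chars.lower ind.toList)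

-- re.search of a literal alternation: a match exists iff some alternative starts at some
-- position of the subject (exact for nonempty literal alternatives).
def reSearchAltSome (alts : List (List Char)) (s : List Char) : Bool :=
  (List.range s.length).any (fun i =>
    alts.any (fun alt => PySem.Chars.startswith (s.drop i) alt))

def contains_storage_code_py_alt (content : String) : Bool :=
  reSearchAltSome storagePatternAlts (PySem.Chars.lower content.toList)

-- ===== PRECONDITION & SPEC =====
def Spec_contains_storage_code_py (content : String) (out : Bool) : Prop := out = contains_storage_code_py_alt content
instance (content : String) (out : Bool) : Decidable (Spec_contains_storage_code_py content out) := by unfold Spec_contains_storage_code_py; infer_instance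

-- ===== CLAIM (what is proved, stated in full; the proofs are below) =====
def Claim_equal_contains_storage_code_py : Prop := ∀ (content : String), Dom_contains_storage_code_py content → Spec_contains_storage_code_py content (contains_storage_code_py content)

-- ===== LEMMAS AND PROOFS =====

-- a nonempty pattern occurs in s iff it starts at some position i < s.length
lemma isIn_eq_any_range (s ind : List Char) (h : ind ≠ []) :
    PySem.Chars.isIn ind s =
      (List.range s.length).any (fun i => PySem.Chars.startswith (s.drop i) ind) := by
  rw [Bool.eq_iff_iff]
  simp only [List.any_eq_true, List.mem_range, PySem.Chars.startswith_iff]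
  rw [← PySem.Chars.exists_prefix_drop_iff_isIn]
  constructor
  · rintro ⟨j, hj⟩
    refine ⟨j, ?_, hj⟩
    by_contra hlt
    push Not at hlt
    have : s.drop j = [] := List.drop_eq_nil_of_le hlt
    rw [this] at hj
    exact h (List.prefix_nil.mp hj)
  · rintro ⟨j, _, hj⟩; exact ⟨j, hj⟩

-- A's lowered indicators are exactly B's compiled alternatives
lemma indicators_alts :
    storageIndicators.map (fun ind => PySem.Chars.lower ind.toList) = storagePatternAlts := by
  decide

-- ===== VERDICT (by name: the statement is the Claim_ definition above) =====
theorem contains_storage_code_py_spec : Claim_equal_contains_storage_code_py := by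
  intro content _
  show contains_storage_code_py content = contains_storage_code_py_alt content
  unfold contains_storage_code_py contains_storage_code_py_alt reSearchAltSome
  rw [Bool.eq_iff_iff]
  simp only [List.any_eq_true]
  constructor
  · rintro ⟨ind, hmem, hin⟩
    rw [isIn_eq_any_range _ _ (by fin_cases hmem <;> decide)] at hin
    simp only [List.any_eq_true, List.mem_range] at hin
    obtain ⟨i, hi, hsw⟩ := hin
    refine ⟨i, List.mem_range.mpr hi, ?_⟩
    have : PySem.Chars.lower ind.toList ∈ storagePatternAlts := by
      rw [← indicators_alts]; exact List.mem_map_of_mem hmem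
    exact ⟨_, this, hsw⟩
  · rintro ⟨i, hi, alt, hmem', hsw⟩
    have : alt ∈ storageIndicators.map (fun ind => PySem.Chars.lower ind.toList) := by
      rw [indicators_alts]; exact hmem'
    obtain ⟨ind, hmem, heq⟩ := List.mem_map.mp this
    refine ⟨ind, hmem, ?_⟩
    rw [isIn_eq_any_range _ _ (by fin_cases hmem <;> decide)]
    simp only [List.any_eq_true, List.mem_range]
    exact ⟨i, List.mem_range.mp hi, heq ▸ hsw⟩
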